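-- pv_equiv track=rewrite | github.com/AlexVulf/TrandsITplus | 1239-Atalhos Bloggo 2.py | convert_bloggo_to_html
-- ===== SOURCE A (Python) =====
-- def convert_bloggo_to_html(text):
--     italic = bold = False
--     result = []
--
--     for char in text:
--         if char == '_':
--             result.append("<i>" if not italic else "</i>")
--             italic = not italic
--         elif char == '*':
--             result.append("<b>" if not bold else "</b>")
--             bold = not bold
--         else:
--             result.append(char)
--
--     return "".join(result)
-- ===== SOURCE B (Python) =====
-- def convert_bloggo_to_html(text):
--     def alternate(s, sep, open_tag, close_tag):
--         parts = s.split(sep)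
--         pieces = [parts[0]]
--         for i, part in enumerate(parts[1:]):
--             pieces.append(open_tag if i % 2 == 0 else close_tag)
--             pieces.append(part)
--         return "".join(pieces)
--     return alternate(alternate(text, "_", "<i>", "</i>"), "*", "<b>", "</b>")
-- ===== Notes on version B (the rewrite author's own statement) =====
-- stated objective: simpler
-- what changed: Replaced the char-by-char loop with two boolean toggle flags by two independent split/rejoin passes (split on the delimiter, interleave alternating open/close tags, join); the per-character Python loop disappears into C-level str.split/str.join, which also makes B measurably faster.
import Mathlib
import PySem

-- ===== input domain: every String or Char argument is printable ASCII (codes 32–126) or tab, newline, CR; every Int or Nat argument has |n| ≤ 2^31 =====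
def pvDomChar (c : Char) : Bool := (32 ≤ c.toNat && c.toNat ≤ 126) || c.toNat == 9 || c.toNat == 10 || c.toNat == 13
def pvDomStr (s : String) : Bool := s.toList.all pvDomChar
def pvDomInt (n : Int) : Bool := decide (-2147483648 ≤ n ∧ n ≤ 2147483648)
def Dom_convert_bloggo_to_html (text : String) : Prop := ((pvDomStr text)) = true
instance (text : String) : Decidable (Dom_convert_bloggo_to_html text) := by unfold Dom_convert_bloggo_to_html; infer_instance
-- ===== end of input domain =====

-- B replaces A's char-by-char double-toggle loop by two independent split/rejoin passes
-- (split on '_' then on '*', interleaving alternating tags); objective: simpler decomposition.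

-- ===== PORT A =====
-- A's loop body: state is (italic, bold, result); the appended piece uses the CURRENT flag, then toggles it.
def pvStepA (st : Bool × Bool × List (List Char)) (c : Char) : Bool × Bool × List (List Char) :=
  if c = '_' then (!st.1, st.2.1, st.2.2 ++ [if st.1 then "</i>".toList else "<i>".toList])
  else if c = '*' then (st.1, !st.2.1, st.2.2 ++ [if st.2.1 then "</b>".toList else "<b>".toList])
  else (st.1, st.2.1, st.2.2 ++ [[c]])

def convert_bloggo_to_html (text : String) : String :=
  String.mk (PySem.Chars.join [] (text.toList.foldl pvStepA (false, false, [])).2.2)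

-- ===== PORT B =====
-- Source B's helper: parts = s.split(sep); rebuild, alternating open/close tags between parts.
def pvAlternate (s sep open_tag close_tag : List Char) : List Char :=
  let parts := PySem.Chars.splitOn s sep
  let pieces := ((parts.drop 1).zipIdx 0).foldl
      (fun acc pi => (acc ++ [if pi.2 % 2 = 0 then open_tag else close_tag]) ++ [pi.1])
      [parts.headD []]
  PySem.Chars.join [] pieces

def convert_bloggo_to_html_alt (text : String) : String :=
  String.mk (pvAlternate (pvAlternate text.toList ['_'] "<i>".toList "</i>".toList)
    ['*'] "<b>".toList "</b>".toList)

-- ===== PRECONDITION & SPEC =====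
def Spec_convert_bloggo_to_html (text : String) (out : String) : Prop := out = convert_bloggo_to_html_alt text
instance (text : String) (out : String) : Decidable (Spec_convert_bloggo_to_html text out) := by unfold Spec_convert_bloggo_to_html; infer_instance

-- ===== CLAIM (what is proved, stated in full; the proofs are below) =====
def Claim_equal_convert_bloggo_to_html : Prop := ∀ (text : String), Dom_convert_bloggo_to_html text → Spec_convert_bloggo_to_html text (convert_bloggo_to_html text)

-- ===== LEMMAS AND PROOFS =====

-- the tag emitted for one separator occurrence: open on an even occurrence count, close on odd
def pvTag (op cl : List Char) (b : Bool) : List Char := if b then cl else op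

-- a single-delimiter toggle pass, the common abstraction of both programs
def pvPassOne (d : Char) (op cl : List Char) : Bool → List Char → List Char
  | _, [] => []
  | b, c :: cs => if c = d then pvTag op cl b ++ pvPassOne d op cl (!b) cs
                  else c :: pvPassOne d op cl b cs

-- recursive characterisation of s.split(d) for a one-character delimiter
def pvSplitOne (d : Char) : List Char → List (List Char)
  | [] => [[]]
  | c :: cs => if c = d then [] :: pvSplitOne d cs else (pvSplitOne d cs).modifyHead (c :: ·)

-- what B's rebuild loop emits after the head part, starting at occurrence index k
def pvExpandJ (op cl : List Char) : Nat → List (List Char) → List Char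
  | _, [] => []
  | k, p :: ps => (if k % 2 = 0 then op else cl) ++ p ++ pvExpandJ op cl (k + 1) ps

-- recursive characterisation of A's combined loop (both toggles at once)
def pvComb : Bool → Bool → List Char → List Char
  | _, _, [] => []
  | i, b, c :: cs =>
    if c = '_' then pvTag "<i>".toList "</i>".toList i ++ pvComb (!i) b cs
    else if c = '*' then pvTag "<b>".toList "</b>".toList b ++ pvComb i (!b) cs
    else c :: pvComb i b cs

-- the list of pieces A's loop accumulates
def pvChunks : Bool → Bool → List Char → List (List Char)
  | _, _, [] => []
  | i, b, c :: cs =>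
    if c = '_' then (if i then "</i>".toList else "<i>".toList) :: pvChunks (!i) b cs
    else if c = '*' then (if b then "</b>".toList else "<b>".toList) :: pvChunks i (!b) cs
    else [c] :: pvChunks i b cs

theorem pv_join_nil_flatten (ps : List (List Char)) : PySem.Chars.join [] ps = ps.flatten := by
  simp only [PySem.Chars.join]
  induction ps with
  | nil => simp [List.intercalate]
  | cons p ps ih => cases ps <;> simp_all [List.intercalate, List.intersperse]

theorem pv_foldA (l : List Char) : ∀ (i b : Bool) (acc : List (List Char)),
    (l.foldl pvStepA (i, b, acc)).2.2 = acc ++ pvChunks i b l := by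
  induction l with
  | nil => intro i b acc; simp [pvChunks]
  | cons c cs ih =>
    intro i b acc
    simp only [List.foldl_cons, pvStepA, pvChunks]
    by_cases h1 : c = '_'
    · simp [h1, ih]
    · by_cases h2 : c = '*' <;> simp [h1, h2, ih]

theorem pv_chunks_flatten (l : List Char) : ∀ (i b : Bool),
    (pvChunks i b l).flatten = pvComb i b l := by
  induction l with
  | nil => intro i b; simp [pvChunks, pvComb]
  | cons c cs ih =>
    intro i b
    by_cases h1 : c = '_'
    · cases i <;> simp [pvChunks, pvComb, pvTag, h1, ih]
    · by_cases h2 : c = '*'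
      · cases b <;> simp [pvChunks, pvComb, pvTag, h1, h2, ih]
      · simp [pvChunks, pvComb, h1, h2, ih]

theorem pv_splitOne_ne_nil (d : Char) (s : List Char) : pvSplitOne d s ≠ [] := by
  induction s with
  | nil => simp [pvSplitOne]
  | cons c cs ih =>
    simp only [pvSplitOne]
    split
    · simp
    · cases h : pvSplitOne d cs with
      | nil => exact absurd h ih
      | cons p ps => simp

theorem pv_go_spec (d : Char) (l : List Char) : ∀ (fuel : Nat) (cur : List Char)
    (acc : List (List Char)), l.length < fuel →
    PySem.Chars.splitOn.go [d] fuel l cur acc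
      = acc.reverse ++ (pvSplitOne d l).modifyHead (cur.reverse ++ ·) := by
  induction l with
  | nil =>
    intro fuel cur acc h
    cases fuel with
    | zero => omega
    | succ f => simp [PySem.Chars.splitOn.go, pvSplitOne]
  | cons c cs ih =>
    intro fuel cur acc h
    cases fuel with
    | zero => simp at h
    | succ f =>
      rw [PySem.Chars.splitOn.go]
      by_cases hc : c = d
      · subst hc
        simp only [List.isPrefixOf, BEq.rfl, Bool.true_and, List.isPrefixOf_nil_left, if_true,
          List.length_singleton, List.drop_one, List.tail_cons]
        rw [ih f [] (cur.reverse :: acc) (by simp at h; omega)]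
        simp only [pvSplitOne, if_pos rfl, List.modifyHead_cons, List.reverse_cons,
          List.append_assoc, List.append_nil, List.nil_append, List.reverse_nil]
        cases pvSplitOne c cs <;> simp
      · have hpre : ([d].isPrefixOf (c :: cs)) = false := by
          simp [List.isPrefixOf]; exact fun h' => hc h'.symm
        simp only [hpre, Bool.false_eq_true, ite_false]
        rw [ih f (c :: cur) acc (by simp at h; omega)]
        simp only [pvSplitOne, if_neg hc]
        cases pvSplitOne d cs <;> simp

theorem pv_splitOn_single (d : Char) (s : List Char) :
    PySem.Chars.splitOn s [d] = pvSplitOne d s := by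
  rw [PySem.Chars.splitOn, pv_go_spec d s (s.length + 1) [] [] (by omega)]
  cases pvSplitOne d s <;> simp

theorem pv_fold_expand (op cl : List Char) (tail : List (List Char)) :
    ∀ (k : Nat) (init : List (List Char)),
    ((tail.zipIdx k).foldl
        (fun acc pi => (acc ++ [if pi.2 % 2 = 0 then op else cl]) ++ [pi.1]) init).flatten
      = init.flatten ++ pvExpandJ op cl k tail := by
  induction tail with
  | nil => intro k init; simp [pvExpandJ]
  | cons p ps ih =>
    intro k init
    rw [List.zipIdx_cons, List.foldl_cons, ih (k + 1)]
    simp [pvExpandJ]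

theorem pv_bool_flip (k : Nat) : (!decide (k % 2 = 1)) = decide ((k + 1) % 2 = 1) := by
  rcases Nat.mod_two_eq_zero_or_one k with h | h <;> simp [h, Nat.add_mod]

theorem pv_passOne_eq (d : Char) (op cl : List Char) (s : List Char) :
    ∀ (k : Nat) (b : Bool), b = decide (k % 2 = 1) →
    pvPassOne d op cl b s
      = (pvSplitOne d s).headD [] ++ pvExpandJ op cl k ((pvSplitOne d s).drop 1) := by
  induction s with
  | nil => intro k b hb; simp [pvPassOne, pvSplitOne, pvExpandJ]
  | cons c cs ih =>
    intro k b hb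
    by_cases hc : c = d
    · subst hc
      obtain ⟨p, ps, hps⟩ := List.exists_cons_of_ne_nil (pv_splitOne_ne_nil c cs)
      have htag : pvTag op cl b = (if k % 2 = 0 then op else cl) := by
        subst hb
        rcases Nat.mod_two_eq_zero_or_one k with h | h <;> simp [pvTag, h]
      rw [pvPassOne, if_pos rfl, ih (k + 1) (!b) (by rw [hb]; exact pv_bool_flip k)]
      simp [pvSplitOne, hps, pvExpandJ, htag]
    · obtain ⟨p, ps, hps⟩ := List.exists_cons_of_ne_nil (pv_splitOne_ne_nil d cs)
      rw [pvPassOne, if_neg hc, ih k b hb]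
      simp [pvSplitOne, if_neg hc, hps]

theorem pv_alternate_eq (d : Char) (op cl : List Char) (s : List Char) :
    pvAlternate s [d] op cl = pvPassOne d op cl false s := by
  rw [pvAlternate, pv_join_nil_flatten]
  simp only [pv_splitOn_single]
  rw [pv_fold_expand, pv_passOne_eq d op cl s 0 false (by decide)]
  simp

theorem pv_passOne_append (d : Char) (op cl : List Char) (x : List Char)
    (hx : ∀ c ∈ x, c ≠ d) : ∀ (b : Bool) (y : List Char),
    pvPassOne d op cl b (x ++ y) = x ++ pvPassOne d op cl b y := by
  induction x with
  | nil => intro b y; simp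
  | cons c cs ih =>
    intro b y
    have hc : c ≠ d := hx c (by simp)
    rw [List.cons_append, pvPassOne, if_neg hc,
      ih (fun c hc => hx c (by simp [hc])) b y, List.cons_append]

set_option maxRecDepth 4096 in
theorem pv_comb_eq (s : List Char) : ∀ (i b : Bool),
    pvComb i b s
      = pvPassOne '*' "<b>".toList "</b>".toList b
          (pvPassOne '_' "<i>".toList "</i>".toList i s) := by
  induction s with
  | nil => intro i b; simp [pvComb, pvPassOne]
  | cons c cs ih =>
    intro i b
    by_cases h1 : c = '_'
    · subst h1
      rw [pvComb, if_pos rfl, pvPassOne, if_pos rfl,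
        pv_passOne_append '*' _ _ (pvTag "<i>".toList "</i>".toList i)
          (by cases i <;> simp [pvTag] <;> decide), ih]
    · by_cases h2 : c = '*'
      · subst h2
        rw [pvComb, if_neg h1, if_pos rfl, pvPassOne, if_neg h1, pvPassOne, if_pos rfl, ih]
      · rw [pvComb, if_neg h1, if_neg h2, pvPassOne, if_neg h1, pvPassOne, if_neg h2, ih]

-- ===== VERDICT (by name: the statement is the Claim_ definition above) =====
theorem convert_bloggo_to_html_spec : Claim_equal_convert_bloggo_to_html := by
  intro text _
  unfold Spec_convert_bloggo_to_html convert_bloggo_to_html convert_bloggo_to_html_alt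
  rw [pv_join_nil_flatten, pv_foldA, List.nil_append, pv_chunks_flatten, pv_comb_eq,
    pv_alternate_eq, pv_alternate_eq]
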